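-- pv_equiv track=rewrite | github.com/Tulki/advent | 2020/day19.py | chkMsgPartB
-- ===== SOURCE A (Python) =====
-- def chkMsgPartB(rule42s, rule31s, skimmed42s, skimmed31s, message):
--     if len(message) % 8 != 0:
--         return False
--
--     if len(message) == 0:
--         return skimmed42s > skimmed31s and skimmed31s > 0
--
--     if message[0:8] in rule42s and skimmed31s == 0:
--         return chkMsgPartB(rule42s, rule31s, skimmed42s + 1, skimmed31s, message[8:])
--
--     elif message[0:8] in rule31s:
--         return chkMsgPartB(rule42s, rule31s, skimmed42s, skimmed31s + 1, message[8:])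
--
--     else:
--         return False
-- ===== SOURCE B (Python) =====
-- def chkMsgPartB(rule42s, rule31s, skimmed42s, skimmed31s, message):
--     if len(message) % 8 != 0:
--         return False
--     c42, c31 = skimmed42s, skimmed31s
--     for i in range(0, len(message), 8):
--         chunk = message[i:i+8]
--         if chunk in rule42s and c31 == 0:
--             c42 += 1
--         elif chunk in rule31s:
--             c31 += 1
--         else:
--             return False
--     return c42 > c31 and c31 > 0
-- ===== Notes on version B (the rewrite author's own statement) =====
-- stated objective: alternative
-- what changed: Replaced A's linear recursion that rebuilds the remaining message suffix on every step with a single iterative pass over the 8-character chunk offsets (range(0, len, 8)), keeping two counters seeded from the skimmed parameters and deciding the final comparison after the loop.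
import Mathlib
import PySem

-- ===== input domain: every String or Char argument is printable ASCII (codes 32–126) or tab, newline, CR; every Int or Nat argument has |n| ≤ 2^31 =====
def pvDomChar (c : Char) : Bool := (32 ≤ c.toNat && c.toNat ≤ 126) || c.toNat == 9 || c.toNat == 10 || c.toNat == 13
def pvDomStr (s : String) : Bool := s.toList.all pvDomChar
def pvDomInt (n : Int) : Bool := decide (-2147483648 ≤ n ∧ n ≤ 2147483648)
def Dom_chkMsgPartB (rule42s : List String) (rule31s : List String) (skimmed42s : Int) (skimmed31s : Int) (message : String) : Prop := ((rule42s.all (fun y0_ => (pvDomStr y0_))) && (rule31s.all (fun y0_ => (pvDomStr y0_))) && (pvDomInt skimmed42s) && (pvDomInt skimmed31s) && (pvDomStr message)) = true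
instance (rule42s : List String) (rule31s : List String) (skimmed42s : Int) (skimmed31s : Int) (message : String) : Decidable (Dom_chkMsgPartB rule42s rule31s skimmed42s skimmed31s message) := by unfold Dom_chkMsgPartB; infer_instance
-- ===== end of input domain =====

-- B replaces A's recursion (which re-slices the remaining message suffix on each call) by one
-- iterative pass over the 8-character chunk offsets, with counters seeded from the skimmed parameters.

-- ===== PORT A =====
-- A's recursion, on the code-point list of the message (PySem.Str wrappers operate on .toList).
def chkA (rule42s rule31s : List String) (skimmed42s skimmed31s : Int) (cs : List Char) : Bool :=
  if cs.length % 8 ≠ 0 then false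
  else if cs.length = 0 then decide (skimmed42s > skimmed31s ∧ skimmed31s > 0)
  else if rule42s.any (fun r => r.toList == PySem.List.slice cs (some 0) (some 8)) ∧ skimmed31s = 0 then
    chkA rule42s rule31s (skimmed42s + 1) skimmed31s (PySem.List.slice cs (some 8) none)
  else if rule31s.any (fun r => r.toList == PySem.List.slice cs (some 0) (some 8)) then
    chkA rule42s rule31s skimmed42s (skimmed31s + 1) (PySem.List.slice cs (some 8) none)
  else false
termination_by cs.length
decreasing_by
  all_goals
    rw [PySem.List.slice_from cs (by norm_num : (0:Int) ≤ 8)]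
    simp only [List.length_drop]
    omega

def chkMsgPartB (rule42s : List String) (rule31s : List String) (skimmed42s : Int) (skimmed31s : Int) (message : String) : Bool :=
  chkA rule42s rule31s skimmed42s skimmed31s message.toList

-- ===== PORT B =====
-- one step of Source B's for-loop; `none` records that the loop body executed 'return False'
def chkBStep (rule42s rule31s : List String) (cs : List Char)
    (st : Option (Int × Int)) (i : Int) : Option (Int × Int) :=
  match st with
  | none => none
  | some (c42, c31) =>
    let chunk := PySem.List.slice cs (some i) (some (i + 8))
    if rule42s.any (fun r => r.toList == chunk) ∧ c31 = 0 then some (c42 + 1, c31)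
    else if rule31s.any (fun r => r.toList == chunk) then some (c42, c31 + 1)
    else none

def chkMsgPartB_alt (rule42s : List String) (rule31s : List String) (skimmed42s : Int) (skimmed31s : Int) (message : String) : Bool :=
  if message.toList.length % 8 ≠ 0 then false
  else
    match (PySem.List.pyRange 0 (message.toList.length : Int) 8).foldl
        (chkBStep rule42s rule31s message.toList) (some (skimmed42s, skimmed31s)) with
    | none => false
    | some (c42, c31) => decide (c42 > c31 ∧ c31 > 0)

-- ===== PRECONDITION & SPEC =====
def Spec_chkMsgPartB (rule42s : List String) (rule31s : List String) (skimmed42s : Int) (skimmed31s : Int) (message : String) (out : Bool) : Prop := out = chkMsgPartB_alt rule42s rule31s skimmed42s skimmed31s message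
instance (rule42s : List String) (rule31s : List String) (skimmed42s : Int) (skimmed31s : Int) (message : String) (out : Bool) : Decidable (Spec_chkMsgPartB rule42s rule31s skimmed42s skimmed31s message out) := by unfold Spec_chkMsgPartB; infer_instance

-- ===== CLAIM (what is proved, stated in full; the proofs are below) =====
def Claim_equal_chkMsgPartB : Prop := ∀ (rule42s : List String) (rule31s : List String) (skimmed42s : Int) (skimmed31s : Int) (message : String), Dom_chkMsgPartB rule42s rule31s skimmed42s skimmed31s message → Spec_chkMsgPartB rule42s rule31s skimmed42s skimmed31s message (chkMsgPartB rule42s rule31s skimmed42s skimmed31s message)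

-- ===== LEMMAS AND PROOFS =====

-- a nonempty step-8 range is a cons of its start
lemma pyRange8_cons (a b : Int) (h : a < b) :
    PySem.List.pyRange a b 8 = a :: PySem.List.pyRange (a + 8) b 8 := by
  rw [PySem.List.pyRange_of_pos a b (by norm_num),
      PySem.List.pyRange_of_pos (a + 8) b (by norm_num)]
  by_cases h2 : a + 8 < b
  · rw [if_pos h, if_pos h2]
    have hc : ((b - a + 8 - 1) / 8).toNat = ((b - (a + 8) + 8 - 1) / 8).toNat + 1 := by omega
    rw [hc, List.range_succ_eq_map]
    simp only [List.map_cons, List.map_map, Nat.cast_zero, mul_zero, add_zero]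
    congr 1
    apply List.map_congr_left
    intro k _
    simp only [Function.comp_apply]
    push_cast
    ring
  · rw [if_pos h, if_neg h2]
    have hc : ((b - a + 8 - 1) / 8).toNat = 1 := by omega
    rw [hc]
    simp

-- the fold is absorbing in `none`
lemma foldl_chkBStep_none (rule42s rule31s : List String) (cs : List Char) (l : List Int) :
    l.foldl (chkBStep rule42s rule31s cs) none = none := by
  induction l with
  | nil => rfl
  | cons x xs ih => simpa [chkBStep] using ih

-- a chunk at offset 8 + 8k of cs is the chunk at offset 8k of cs.drop 8
lemma chunk_shift (cs : List Char) (k : Nat) :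
    PySem.List.slice cs (some (8 + 8 * (k : Int))) (some (8 + 8 * (k : Int) + 8))
      = PySem.List.slice (cs.drop 8) (some (8 * (k : Int))) (some (8 * (k : Int) + 8)) := by
  rw [PySem.List.slice_toNat cs (by positivity) (by positivity),
      PySem.List.slice_toNat (cs.drop 8) (by positivity) (by positivity)]
  have h1 : (8 + 8 * (k : Int)).toNat = 8 + 8 * k := by omega
  have h2 : (8 + 8 * (k : Int) + 8).toNat = 8 + 8 * k + 8 := by omega
  have h3 : (8 * (k : Int)).toNat = 8 * k := by omega
  have h4 : (8 * (k : Int) + 8).toNat = 8 * k + 8 := by omega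
  have e1 : 8 + 8 * k + 8 - (8 + 8 * k) = 8 := by omega
  have e2 : 8 * k + 8 - 8 * k = 8 := by omega
  rw [h1, h2, h3, h4, List.drop_drop, e1, e2]

-- shift the fold from offsets 8,16,… on cs to offsets 0,8,… on cs.drop 8
lemma fold_shift (rule42s rule31s : List String) (cs : List Char) (st : Option (Int × Int)) :
    (PySem.List.pyRange 8 (cs.length : Int) 8).foldl (chkBStep rule42s rule31s cs) st
      = (PySem.List.pyRange 0 (((cs.drop 8).length : Nat) : Int) 8).foldl
          (chkBStep rule42s rule31s (cs.drop 8)) st := by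
  rw [PySem.List.pyRange_of_pos 8 (cs.length : Int) (by norm_num),
      PySem.List.pyRange_of_pos 0 (((cs.drop 8).length : Nat) : Int) (by norm_num)]
  by_cases h : (8 : Int) < (cs.length : Int)
  · rw [if_pos h, if_pos (by simp only [List.length_drop]; omega)]
    have hc : ((cs.length : Int) - 8 + 8 - 1) / 8
        = ((((cs.drop 8).length : Nat) : Int) - 0 + 8 - 1) / 8 := by
      simp only [List.length_drop]
      omega
    rw [hc, List.foldl_map, List.foldl_map]
    congr 1
    funext st' k
    cases st' with
    | none => rfl
    | some p =>
      obtain ⟨a, b⟩ := p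
      simp only [chkBStep, zero_add, chunk_shift cs k]
  · rw [if_neg h, if_neg (by simp only [List.length_drop]; omega)]
    simp

-- main invariant: A's recursion equals B's loop from any counter state
lemma main_lemma (rule42s rule31s : List String) :
    ∀ cs : List Char, ∀ c42 c31 : Int, cs.length % 8 = 0 →
      chkA rule42s rule31s c42 c31 cs
        = match (PySem.List.pyRange 0 (cs.length : Int) 8).foldl
              (chkBStep rule42s rule31s cs) (some (c42, c31)) with
          | none => false
          | some (a, b) => decide (a > b ∧ b > 0) := by
  have H : ∀ n : Nat, ∀ cs : List Char, cs.length = n → ∀ c42 c31 : Int, cs.length % 8 = 0 →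
      chkA rule42s rule31s c42 c31 cs
        = match (PySem.List.pyRange 0 (cs.length : Int) 8).foldl
              (chkBStep rule42s rule31s cs) (some (c42, c31)) with
          | none => false
          | some (a, b) => decide (a > b ∧ b > 0) := by
    intro n
    induction n using Nat.strong_induction_on with
    | _ n ih =>
      intro cs hlen c42 c31 hmod
      by_cases hz : cs.length = 0
      · rw [chkA, if_neg (by omega), if_pos hz]
        rw [hz]
        simp only [Nat.cast_zero]
        rfl
      · have h8 : 8 ≤ cs.length := by omega
        rw [chkA, if_neg (by omega), if_neg hz]
        have hcons : PySem.List.pyRange 0 (cs.length : Int) 8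
            = 0 :: PySem.List.pyRange (0 + 8) (cs.length : Int) 8 :=
          pyRange8_cons 0 (cs.length : Int) (by exact_mod_cast Nat.pos_of_ne_zero hz)
        rw [hcons, List.foldl_cons]
        have hstep0 : chkBStep rule42s rule31s cs (some (c42, c31)) 0 =
            (if rule42s.any (fun r => r.toList == PySem.List.slice cs (some 0) (some 8)) ∧ c31 = 0
              then some (c42 + 1, c31)
            else if rule31s.any (fun r => r.toList == PySem.List.slice cs (some 0) (some 8))
              then some (c42, c31 + 1)
            else none) := by
          simp only [chkBStep, zero_add]
        have hdroplen : (cs.drop 8).length % 8 = 0 := by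
          simp only [List.length_drop]; omega
        have hdropn : (cs.drop 8).length < n := by
          simp only [List.length_drop]; omega
        have hslice : PySem.List.slice cs (some 8) none = cs.drop 8 := by
          rw [PySem.List.slice_from cs (by norm_num : (0:Int) ≤ 8)]
          rfl
        have hshift := fold_shift rule42s rule31s cs
        simp only [zero_add] at hcons ⊢
        rw [hstep0, hslice]
        by_cases h42 : rule42s.any (fun r => r.toList == PySem.List.slice cs (some 0) (some 8)) ∧ c31 = 0
        · rw [if_pos h42, if_pos h42, hshift]
          exact ih (cs.drop 8).length hdropn (cs.drop 8) rfl (c42 + 1) c31 hdroplen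
        · rw [if_neg h42, if_neg h42]
          by_cases h31 : rule31s.any (fun r => r.toList == PySem.List.slice cs (some 0) (some 8))
          · rw [if_pos h31, if_pos h31, hshift]
            exact ih (cs.drop 8).length hdropn (cs.drop 8) rfl c42 (c31 + 1) hdroplen
          · rw [if_neg h31, if_neg h31, foldl_chkBStep_none]
  intro cs
  exact H cs.length cs rfl

-- ===== VERDICT (by name: the statement is the Claim_ definition above) =====
theorem chkMsgPartB_spec : Claim_equal_chkMsgPartB := by
  intro rule42s rule31s s42 s31 message _
  unfold Spec_chkMsgPartB chkMsgPartB chkMsgPartB_alt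
  by_cases h : message.toList.length % 8 = 0
  · rw [if_neg (not_not_intro h)]
    exact main_lemma rule42s rule31s message.toList s42 s31 h
  · rw [if_pos h, chkA, if_pos h]
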